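-- pv_equiv track=rewrite | github.com/ashrafino/EduPDF-Intelligence | scrapers/intelligent_crawler.py | _is_crawlable_content_type
-- ===== SOURCE A (Python) =====
-- def _is_crawlable_content_type(url: str) -> bool:
--     """Check if URL points to crawlable content."""
--     # Skip binary files
--     skip_extensions = [
--         '.pdf', '.doc', '.docx', '.ppt', '.pptx', '.xls', '.xlsx',
--         '.zip', '.tar', '.gz', '.rar', '.7z',
--         '.jpg', '.jpeg', '.png', '.gif', '.bmp', '.svg',
--         '.mp3', '.mp4', '.avi', '.mov', '.wmv',
--         '.exe', '.dmg', '.pkg'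
--     ]
--
--     url_lower = url.lower()
--     return not any(url_lower.endswith(ext) for ext in skip_extensions)
-- ===== SOURCE B (Python) =====
-- # B: rpartition off the text after the last '.', then classify that tail with a
-- # structured match statement -- no per-extension endswith scan over the URL.
-- def _is_crawlable_content_type(url: str) -> bool:
--     """Check if URL points to crawlable content."""
--     _head, sep, tail = url.lower().rpartition('.')
--     if not sep:
--         return True
--     match tail:
--         case ('pdf' | 'doc' | 'docx' | 'ppt' | 'pptx' | 'xls' | 'xlsx'
--               | 'zip' | 'tar' | 'gz' | 'rar' | '7z'
--               | 'jpg' | 'jpeg' | 'png' | 'gif' | 'bmp' | 'svg'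
--               | 'mp3' | 'mp4' | 'avi' | 'mov' | 'wmv'
--               | 'exe' | 'dmg' | 'pkg'):
--             return False
--         case _:
--             return True
-- ===== Notes on version B (the rewrite author's own statement) =====
-- stated objective: idiomatic
-- what changed: B rpartitions the lowercased URL at its last dot once and classifies the tail with a single match statement, instead of A's any() scan running endswith against all 26 extensions over the whole URL.
import Mathlib
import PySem

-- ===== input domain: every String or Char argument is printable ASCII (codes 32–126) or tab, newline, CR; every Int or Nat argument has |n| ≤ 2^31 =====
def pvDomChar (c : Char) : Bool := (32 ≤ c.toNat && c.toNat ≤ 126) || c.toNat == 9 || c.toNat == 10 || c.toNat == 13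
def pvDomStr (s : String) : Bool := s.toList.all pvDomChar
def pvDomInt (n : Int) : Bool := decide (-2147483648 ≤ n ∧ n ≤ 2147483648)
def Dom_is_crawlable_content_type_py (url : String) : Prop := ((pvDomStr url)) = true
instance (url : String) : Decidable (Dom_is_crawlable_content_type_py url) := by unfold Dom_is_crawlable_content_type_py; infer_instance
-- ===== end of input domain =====

-- B rpartitions off the text after the last '.' and classifies it with one match statement, instead of A's 26 endswith scans over the URL (idiomatic rewrite, same results).

-- ===== PORT A =====
def pvSkipExtensions : List String :=
  [".pdf", ".doc", ".docx", ".ppt", ".pptx", ".xls", ".xlsx",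
   ".zip", ".tar", ".gz", ".rar", ".7z",
   ".jpg", ".jpeg", ".png", ".gif", ".bmp", ".svg",
   ".mp3", ".mp4", ".avi", ".mov", ".wmv",
   ".exe", ".dmg", ".pkg"]

def is_crawlable_content_type_py (url : String) : Bool :=
  let url_lower := PySem.Str.lower url
  !(pvSkipExtensions.any (fun ext => PySem.Str.endswith url_lower ext))

-- ===== PORT B =====
-- Source B's match statement on the tail: False (skip) for a known binary extension, True otherwise
def pvMatchTail (tail : String) : Bool :=
  match tail with
  | "pdf" | "doc" | "docx" | "ppt" | "pptx" | "xls" | "xlsx"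
  | "zip" | "tar" | "gz" | "rar" | "7z"
  | "jpg" | "jpeg" | "png" | "gif" | "bmp" | "svg"
  | "mp3" | "mp4" | "avi" | "mov" | "wmv"
  | "exe" | "dmg" | "pkg" => false
  | _ => true

-- hand port of rpartition('.') on a char list: tail = the characters after the LAST '.'
-- (exact: Python's sep is truthy iff '.' occurs in the string, and tail is then this suffix)
def pvTailAfterDot (cs : List Char) : List Char :=
  (cs.reverse.takeWhile (fun c => c != '.')).reverse

def is_crawlable_content_type_py_alt (url : String) : Bool :=
  let lowered := (PySem.Str.lower url).toList
  if lowered.contains '.' then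
    pvMatchTail (String.ofList (pvTailAfterDot lowered))
  else
    true

-- ===== PRECONDITION & SPEC =====
def Spec_is_crawlable_content_type_py (url : String) (out : Bool) : Prop := out = is_crawlable_content_type_py_alt url
instance (url : String) (out : Bool) : Decidable (Spec_is_crawlable_content_type_py url out) := by unfold Spec_is_crawlable_content_type_py; infer_instance

-- ===== CLAIM (what is proved, stated in full; the proofs are below) =====
def Claim_equal_is_crawlable_content_type_py : Prop := ∀ (url : String), Dom_is_crawlable_content_type_py url → Spec_is_crawlable_content_type_py url (is_crawlable_content_type_py url)

-- ===== LEMMAS AND PROOFS =====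

lemma pv_takeWhile_stop {α : Type} (p : α → Bool) (xs : List α) (y : α) (ys : List α)
    (h : ∀ x ∈ xs, p x = true) (hy : p y = false) :
    (xs ++ y :: ys).takeWhile p = xs := by
  induction xs with
  | nil => simp [hy]
  | cons a t ih =>
      have ha := h a (by simp)
      simp only [List.cons_append, List.takeWhile_cons, ha, if_true]
      simp_all

lemma pv_exists_stop {α : Type} (p : α → Bool) (xs : List α) (y : α)
    (hy : y ∈ xs) (hpy : p y = false) :
    ∃ z zs, p z = false ∧ xs = xs.takeWhile p ++ z :: zs := by
  induction xs with
  | nil => cases hy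
  | cons a t ih =>
      by_cases ha : p a = true
      · have hyt : y ∈ t := by
          rcases hy with _ | h
          · exact absurd ha (by simp [hpy])
          · assumption
        obtain ⟨z, zs, hz, ht⟩ := ih hyt
        exact ⟨z, zs, hz, by simp [ha]; exact ht⟩
      · exact ⟨a, t, by simpa using ha, by simp [ha]⟩

-- endswith against a dot-free extension body ↔ the last '.'-segment matches
lemma pv_endswith_dot (cs b : List Char) (hb : '.' ∉ b) :
    PySem.Chars.endswith cs ('.' :: b) = (cs.contains '.' && (pvTailAfterDot cs == b)) := by
  rw [Bool.eq_iff_iff]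
  simp only [PySem.Chars.endswith_iff, Bool.and_eq_true, beq_iff_eq, List.contains_eq_mem,
    decide_eq_true_eq]
  constructor
  · rintro ⟨u, rfl⟩
    refine ⟨by simp, ?_⟩
    unfold pvTailAfterDot
    have : (u ++ '.' :: b).reverse = b.reverse ++ '.' :: u.reverse := by simp
    rw [this, pv_takeWhile_stop (fun c => c != '.') b.reverse '.' u.reverse
      (by intro x hx; simp at hx ⊢; intro h; exact hb (h ▸ hx)) (by simp)]
    simp
  · rintro ⟨hmem, hlast⟩
    have hmemr : '.' ∈ cs.reverse := by simpa using hmem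
    obtain ⟨z, zs, hz, hsplit⟩ :=
      pv_exists_stop (fun c => c != '.') cs.reverse '.' hmemr (by simp)
    have hzdot : z = '.' := by simpa using hz
    have htake : cs.reverse.takeWhile (fun c => c != '.') = b.reverse := by
      have : (cs.reverse.takeWhile (fun c => c != '.')).reverse = b := hlast
      calc cs.reverse.takeWhile (fun c => c != '.')
          = ((cs.reverse.takeWhile (fun c => c != '.')).reverse).reverse := by simp
        _ = b.reverse := by rw [this]
    rw [htake, hzdot] at hsplit
    refine ⟨zs.reverse, ?_⟩
    have : cs = (b.reverse ++ '.' :: zs).reverse := by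
      rw [← hsplit]; simp
    rw [this]; simp

lemma pv_any_ext (cs : List Char) (l : List String)
    (h : ∀ e ∈ l, e.toList.head? = some '.' ∧ '.' ∉ e.toList.drop 1) :
    l.any (fun e => PySem.Chars.endswith cs e.toList)
      = (cs.contains '.' && l.any (fun e => ('.' :: pvTailAfterDot cs) == e.toList)) := by
  induction l with
  | nil => simp
  | cons e t ih =>
      obtain ⟨hhead, hdrop⟩ := h e (by simp)
      obtain ⟨c, b, hcb⟩ : ∃ c b, e.toList = c :: b := by
        cases hel : e.toList with
        | nil => rw [hel] at hhead; cases hhead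
        | cons c b => exact ⟨c, b, rfl⟩
      have hc : c = '.' := by rw [hcb] at hhead; simpa using hhead
      have hbdot : '.' ∉ b := by rw [hcb] at hdrop; simpa using hdrop
      have ht := ih (fun e' he' => h e' (by simp [he']))
      simp only [List.any_cons, ht, hcb, hc, pv_endswith_dot cs b hbdot]
      cases hcc : cs.contains '.' <;> simp [List.cons_beq_cons, BEq.comm]

-- the match statement decides exactly membership of the '.'-prefixed tail in A's list
set_option maxHeartbeats 1600000 in
lemma pv_match_eq (b : List Char) :
    pvMatchTail (String.ofList b) = !(pvSkipExtensions.any (fun e => ('.' :: b) == e.toList)) := by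
  rw [pvMatchTail.eq_def]
  split
  all_goals
    first
    | (rename_i heq
       have hb := congrArg String.toList heq
       simp only [String.toList_ofList] at hb
       subst hb
       decide)
    | (rename_i h1 h2 h3 h4 h5 h6 h7 h8 h9 h10 h11 h12 h13 h14 h15 h16 h17 h18 h19 h20 h21 h22 h23 h24 h25 h26
       simp [pvSkipExtensions]
       exact ⟨fun hbs => h1 (by subst hbs; decide),
         fun hbs => h2 (by subst hbs; decide),
         fun hbs => h3 (by subst hbs; decide),
         fun hbs => h4 (by subst hbs; decide),
         fun hbs => h5 (by subst hbs; decide),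
         fun hbs => h6 (by subst hbs; decide),
         fun hbs => h7 (by subst hbs; decide),
         fun hbs => h8 (by subst hbs; decide),
         fun hbs => h9 (by subst hbs; decide),
         fun hbs => h10 (by subst hbs; decide),
         fun hbs => h11 (by subst hbs; decide),
         fun hbs => h12 (by subst hbs; decide),
         fun hbs => h13 (by subst hbs; decide),
         fun hbs => h14 (by subst hbs; decide),
         fun hbs => h15 (by subst hbs; decide),
         fun hbs => h16 (by subst hbs; decide),
         fun hbs => h17 (by subst hbs; decide),
         fun hbs => h18 (by subst hbs; decide),
         fun hbs => h19 (by subst hbs; decide),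
         fun hbs => h20 (by subst hbs; decide),
         fun hbs => h21 (by subst hbs; decide),
         fun hbs => h22 (by subst hbs; decide),
         fun hbs => h23 (by subst hbs; decide),
         fun hbs => h24 (by subst hbs; decide),
         fun hbs => h25 (by subst hbs; decide),
         fun hbs => h26 (by subst hbs; decide)⟩)

-- ===== VERDICT (by name: the statement is the Claim_ definition above) =====
theorem is_crawlable_content_type_py_spec : Claim_equal_is_crawlable_content_type_py := by
  intro url _
  unfold Spec_is_crawlable_content_type_py is_crawlable_content_type_py is_crawlable_content_type_py_alt
  set cs : List Char := (PySem.Str.lower url).toList with hcs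
  have hends : ∀ p : String,
      PySem.Str.endswith (PySem.Str.lower url) p = PySem.Chars.endswith cs p.toList := by
    intro p; simp [hcs]
  simp only [hends]
  rw [pv_any_ext cs pvSkipExtensions (by decide)]
  cases hcc : cs.contains '.' with
  | false => simp
  | true =>
      rw [if_pos rfl, pv_match_eq]
      simp
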